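-- pv_equiv track=rewrite | github.com/Zubair-khan0723/AlgoOracle-AI | utils/text_feature_extractor.py | extract_features_from_text
-- ===== SOURCE A (Python) =====
-- def extract_features_from_text(text, features):
--
--     text = text.lower()
--
--     vector = []
--
--     for f in features:
--
--         value = 0
--
--         # Sorting related
--         if f == "sorting":
--             if any(word in text for word in [
--                 "sort","sorting","sorted",
--                 "ascending","descending",
--                 "order","arrange"
--             ]):
--                 value = 1
--
--         # Arrays often used in sorting
--         elif f == "uses_array":
--             if any(word in text for word in [
--                 "array","list","numbers","elements"
--             ]):
--                 value = 1
--
--         # Divide and conquer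
--         elif f == "divide_conquer":
--             if "divide and conquer" in text:
--                 value = 1
--
--         # Graph problems
--         elif f == "uses_graph":
--             if any(word in text for word in [
--                 "graph","node","edge","network","city"
--             ]):
--                 value = 1
--
--         # Shortest path
--         elif f == "shortest_path":
--             if any(word in text for word in [
--                 "shortest path",
--                 "minimum distance",
--                 "route",
--                 "distance"
--             ]):
--                 value = 1
--
--         # Searching
--         elif f == "search":
--             if any(word in text for word in [
--                 "search","find element","lookup"
--             ]):
--                 value = 1
--
--         # Recursion
--         elif f == "recursion":
--             if any(word in text for word in [
--                 "recursion","recursive"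
--             ]):
--                 value = 1
--
--         # Greedy
--         elif f == "greedy":
--             if "greedy" in text:
--                 value = 1
--
--         # Backtracking
--         elif f == "backtracking":
--             if any(word in text for word in [
--                 "permutation","subset","backtracking"
--             ]):
--                 value = 1
--
--         vector.append(value)
--
--     return vector
-- ===== SOURCE B (Python) =====
-- # (keyword, feature-name) pairs, flattened from the spec's keyword groups
-- _KW = [
--     ("sort", "sorting"), ("sorting", "sorting"), ("sorted", "sorting"),
--     ("ascending", "sorting"), ("descending", "sorting"), ("order", "sorting"),
--     ("arrange", "sorting"),
--     ("array", "uses_array"), ("list", "uses_array"), ("numbers", "uses_array"),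
--     ("elements", "uses_array"),
--     ("divide and conquer", "divide_conquer"),
--     ("graph", "uses_graph"), ("node", "uses_graph"), ("edge", "uses_graph"),
--     ("network", "uses_graph"), ("city", "uses_graph"),
--     ("shortest path", "shortest_path"), ("minimum distance", "shortest_path"),
--     ("route", "shortest_path"), ("distance", "shortest_path"),
--     ("search", "search"), ("find element", "search"), ("lookup", "search"),
--     ("recursion", "recursion"), ("recursive", "recursion"),
--     ("greedy", "greedy"),
--     ("permutation", "backtracking"), ("subset", "backtracking"),
--     ("backtracking", "backtracking"),
-- ]
--
--
-- def extract_features_from_text(text, features):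
--     t = text.lower()
--     # one left-to-right scan of the text: at each position, record every
--     # feature whose keyword starts there (naive multi-pattern matching)
--     fired = set()
--     for i in range(len(t)):
--         for kw, feat in _KW:
--             if feat not in fired and t.startswith(kw, i):
--                 fired.add(feat)
--     return [1 if f in fired else 0 for f in features]
-- ===== Notes on version B (the rewrite author's own statement) =====
-- stated objective: alternative
-- what changed: Replaced per-feature keyword-cascade substring tests with a single left-to-right scan over the text that naively multi-pattern-matches a flat (keyword, feature) list at each position, accumulating the set of fired features, then a membership lookup per requested feature.
import Mathlib
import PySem

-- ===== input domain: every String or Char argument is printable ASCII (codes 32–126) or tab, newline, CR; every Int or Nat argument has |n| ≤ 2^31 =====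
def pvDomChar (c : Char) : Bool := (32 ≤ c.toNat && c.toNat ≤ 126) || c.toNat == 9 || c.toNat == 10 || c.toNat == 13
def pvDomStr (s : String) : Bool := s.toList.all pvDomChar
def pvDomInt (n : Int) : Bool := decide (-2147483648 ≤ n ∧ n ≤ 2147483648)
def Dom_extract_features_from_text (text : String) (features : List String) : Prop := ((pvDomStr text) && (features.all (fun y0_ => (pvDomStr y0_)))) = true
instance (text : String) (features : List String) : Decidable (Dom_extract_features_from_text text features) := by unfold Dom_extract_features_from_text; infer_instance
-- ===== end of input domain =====

-- B replaces A's per-feature keyword-cascade substring tests by a single left-to-right scan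
-- of the text that multi-pattern-matches a flat (keyword, feature) list at each position
-- (alternative algorithm, same results).

-- ===== PORT A =====
-- the per-feature if/elif cascade of A, computing `value` for one feature f
def pvAValue (t f : String) : Int :=
  if f == "sorting" then
    (if ["sort", "sorting", "sorted", "ascending", "descending", "order", "arrange"].any
        (fun w => PySem.Str.isIn w t) then 1 else 0)
  else if f == "uses_array" then
    (if ["array", "list", "numbers", "elements"].any (fun w => PySem.Str.isIn w t) then 1 else 0)
  else if f == "divide_conquer" then
    (if PySem.Str.isIn "divide and conquer" t then 1 else 0)
  else if f == "uses_graph" then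
    (if ["graph", "node", "edge", "network", "city"].any (fun w => PySem.Str.isIn w t) then 1 else 0)
  else if f == "shortest_path" then
    (if ["shortest path", "minimum distance", "route", "distance"].any
        (fun w => PySem.Str.isIn w t) then 1 else 0)
  else if f == "search" then
    (if ["search", "find element", "lookup"].any (fun w => PySem.Str.isIn w t) then 1 else 0)
  else if f == "recursion" then
    (if ["recursion", "recursive"].any (fun w => PySem.Str.isIn w t) then 1 else 0)
  else if f == "greedy" then
    (if PySem.Str.isIn "greedy" t then 1 else 0)
  else if f == "backtracking" then
    (if ["permutation", "subset", "backtracking"].any (fun w => PySem.Str.isIn w t) then 1 else 0)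
  else 0

def extract_features_from_text (text : String) (features : List String) : List Int :=
  let t := PySem.Str.lower text
  features.foldl (fun vector f => vector ++ [pvAValue t f]) []

-- ===== PORT B =====
-- Source B's flat (keyword, feature) list _KW
def pvKW : List (String × String) :=
  [("sort", "sorting"), ("sorting", "sorting"), ("sorted", "sorting"),
   ("ascending", "sorting"), ("descending", "sorting"), ("order", "sorting"),
   ("arrange", "sorting"),
   ("array", "uses_array"), ("list", "uses_array"), ("numbers", "uses_array"),
   ("elements", "uses_array"),
   ("divide and conquer", "divide_conquer"),
   ("graph", "uses_graph"), ("node", "uses_graph"), ("edge", "uses_graph"),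
   ("network", "uses_graph"), ("city", "uses_graph"),
   ("shortest path", "shortest_path"), ("minimum distance", "shortest_path"),
   ("route", "shortest_path"), ("distance", "shortest_path"),
   ("search", "search"), ("find element", "search"), ("lookup", "search"),
   ("recursion", "recursion"), ("recursive", "recursion"),
   ("greedy", "greedy"),
   ("permutation", "backtracking"), ("subset", "backtracking"),
   ("backtracking", "backtracking")]

-- t.startswith(kw, i): exact for 0 ≤ i (here i comes from range(len(t)), so 0 ≤ i)
def pvStartsAt (t : List Char) (kw : String) (i : Int) : Bool :=
  kw.toList.isPrefixOf (t.drop i.toNat)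

def extract_features_from_text_alt (text : String) (features : List String) : List Int :=
  let t := PySem.Str.lower text
  let fired : PySem.Set String :=
    (PySem.List.pyRange 0 (PySem.Str.len t) 1).foldl
      (fun fired i =>
        pvKW.foldl
          (fun fired p =>
            if !(PySem.Set.contains fired p.2) && pvStartsAt t.toList p.1 i then
              PySem.Set.add fired p.2
            else fired)
          fired)
      PySem.Set.empty
  features.map (fun f => if PySem.Set.contains fired f then 1 else 0)

-- ===== PRECONDITION & SPEC =====
def Spec_extract_features_from_text (text : String) (features : List String) (out : List Int) : Prop := out = extract_features_from_text_alt text features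
instance (text : String) (features : List String) (out : List Int) : Decidable (Spec_extract_features_from_text text features out) := by unfold Spec_extract_features_from_text; infer_instance

-- ===== CLAIM (what is proved, stated in full; the proofs are below) =====
def Claim_equal_extract_features_from_text : Prop := ∀ (text : String) (features : List String), Dom_extract_features_from_text text features → Spec_extract_features_from_text text features (extract_features_from_text text features)

-- ===== LEMMAS AND PROOFS =====

-- membership after the inner fold over the keyword list (any guarded-add fold)
lemma mem_foldl_guarded_add {α : Type} (key : α → String) (cond : α → Bool)
    (l : List α) (s : PySem.Set String) (f : String) :
    (f ∈ l.foldl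
        (fun s p => if !(PySem.Set.contains s (key p)) && cond p then PySem.Set.add s (key p) else s) s)
      ↔ f ∈ s ∨ (∃ p ∈ l, key p = f ∧ cond p = true) := by
  induction l generalizing s with
  | nil => simp
  | cons a l ih =>
    simp only [List.foldl_cons, ih, List.mem_cons]
    by_cases hc : cond a = true
    · by_cases hm : PySem.Set.contains s (key a) = true
      · simp only [hm, hc, Bool.not_true, Bool.false_and]
        rw [PySem.Set.contains_iff] at hm
        constructor
        · rintro (h | ⟨p, hp, h1, h2⟩)
          · exact Or.inl h
          · exact Or.inr ⟨p, Or.inr hp, h1, h2⟩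
        · rintro (h | ⟨p, (rfl | hp), h1, h2⟩)
          · exact Or.inl h
          · exact Or.inl (h1 ▸ hm)
          · exact Or.inr ⟨p, hp, h1, h2⟩
      · simp only [hm, hc, Bool.not_false, Bool.true_and, if_true, PySem.Set.mem_add]
        constructor
        · rintro (⟨h | rfl⟩ | ⟨p, hp, h1, h2⟩)
          · exact Or.inl h
          · exact Or.inr ⟨a, Or.inl rfl, rfl, hc⟩
          · exact Or.inr ⟨p, Or.inr hp, h1, h2⟩
        · rintro (h | ⟨p, (rfl | hp), h1, h2⟩)
          · exact Or.inl (Or.inl h)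
          · exact Or.inl (Or.inr h1.symm)
          · exact Or.inr ⟨p, hp, h1, h2⟩
    · simp only [hc, Bool.and_false]
      constructor
      · rintro (h | ⟨p, hp, h1, h2⟩)
        · exact Or.inl h
        · exact Or.inr ⟨p, Or.inr hp, h1, h2⟩
      · rintro (h | ⟨p, (rfl | hp), h1, h2⟩)
        · exact Or.inl h
        · exact absurd h2 hc
        · exact Or.inr ⟨p, hp, h1, h2⟩

-- membership after the outer fold over the positions
lemma mem_outer_fold (tl : List Char) (is : List Int) (s : PySem.Set String) (f : String) :
    (f ∈ is.foldl
        (fun fired i =>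
          pvKW.foldl
            (fun fired p =>
              if !(PySem.Set.contains fired p.2) && pvStartsAt tl p.1 i then
                PySem.Set.add fired p.2
              else fired)
            fired) s)
      ↔ f ∈ s ∨ ∃ i ∈ is, ∃ p ∈ pvKW, p.2 = f ∧ pvStartsAt tl p.1 i = true := by
  induction is generalizing s with
  | nil => simp
  | cons i is ih =>
    simp only [List.foldl_cons, ih, List.mem_cons,
      mem_foldl_guarded_add (fun p : String × String => p.2) (fun p : String × String => pvStartsAt tl p.1 i)]
    constructor
    · rintro (⟨h | ⟨p, hp, h1, h2⟩⟩ | ⟨j, hj, p, hp, h1, h2⟩)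
      · exact Or.inl h
      · exact Or.inr ⟨i, Or.inl rfl, p, hp, h1, h2⟩
      · exact Or.inr ⟨j, Or.inr hj, p, hp, h1, h2⟩
    · rintro (h | ⟨j, (rfl | hj), p, hp, h1, h2⟩)
      · exact Or.inl (Or.inl h)
      · exact Or.inl (Or.inr ⟨p, hp, h1, h2⟩)
      · exact Or.inr ⟨j, hj, p, hp, h1, h2⟩

-- the scan over positions 0..len-1 finds a keyword iff it is a substring
lemma scan_iff_isIn (t : String) (kw : String) (hkw : kw ≠ "") :
    (∃ i ∈ PySem.List.pyRange 0 (PySem.Str.len t) 1, pvStartsAt t.toList kw i = true)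
      ↔ PySem.Str.isIn kw t = true := by
  rw [PySem.Str.isIn_eq, ← PySem.Chars.exists_prefix_drop_iff_isIn]
  constructor
  · rintro ⟨i, _, hi⟩
    exact ⟨i.toNat, by simpa [pvStartsAt, List.isPrefixOf_iff_prefix] using hi⟩
  · rintro ⟨j, hj⟩
    by_cases hle : j < t.toList.length
    · refine ⟨(j : Int), ?_, ?_⟩
      · rw [PySem.List.mem_pyRange_one]
        constructor
        · positivity
        · simp only [PySem.Str.len_eq]
          exact_mod_cast hle
      · simpa [pvStartsAt, List.isPrefixOf_iff_prefix] using hj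
    · exfalso
      rw [List.drop_eq_nil_of_le (by omega)] at hj
      rw [List.prefix_nil] at hj
      exact hkw (by simpa using hj)

-- B's fired-set membership, characterised
lemma fired_iff (t f : String) :
    (PySem.Set.contains
      ((PySem.List.pyRange 0 (PySem.Str.len t) 1).foldl
        (fun fired i =>
          pvKW.foldl
            (fun fired p =>
              if !(PySem.Set.contains fired p.2) && pvStartsAt t.toList p.1 i then
                PySem.Set.add fired p.2
              else fired)
            fired) PySem.Set.empty) f = true)
      ↔ ∃ p ∈ pvKW, p.2 = f ∧ PySem.Str.isIn p.1 t = true := by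
  rw [PySem.Set.contains_iff, mem_outer_fold]
  constructor
  · rintro (h | ⟨i, hi, p, hp, h1, h2⟩)
    · simp [PySem.Set.empty] at h
    · refine ⟨p, hp, h1, ?_⟩
      rw [← scan_iff_isIn t p.1 ?_]
      · exact ⟨i, hi, h2⟩
      · fin_cases hp <;> decide
  · rintro ⟨p, hp, h1, h2⟩
    rw [← scan_iff_isIn t p.1 (by fin_cases hp <;> decide)] at h2
    obtain ⟨i, hi, hs⟩ := h2
    exact Or.inr ⟨i, hi, p, hp, h1, hs⟩

-- A's cascade value equals B's fired-set membership
lemma pvValue_eq_fired (t f : String) :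
    pvAValue t f =
      (if ∃ p ∈ pvKW, p.2 = f ∧ PySem.Str.isIn p.1 t = true then 1 else 0) := by
  unfold pvAValue
  by_cases h0 : f = "sorting"
  · subst h0; simp [pvKW, List.mem_cons]
  · by_cases h1 : f = "uses_array"
    · subst h1; simp [pvKW, List.mem_cons]
    · by_cases h2 : f = "divide_conquer"
      · subst h2; simp [pvKW, List.mem_cons]
      · by_cases h3 : f = "uses_graph"
        · subst h3; simp [pvKW, List.mem_cons]
        · by_cases h4 : f = "shortest_path"
          · subst h4; simp [pvKW, List.mem_cons]
          · by_cases h5 : f = "search"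
            · subst h5; simp [pvKW, List.mem_cons]
            · by_cases h6 : f = "recursion"
              · subst h6; simp [pvKW, List.mem_cons]
              · by_cases h7 : f = "greedy"
                · subst h7; simp [pvKW, List.mem_cons]
                · by_cases h8 : f = "backtracking"
                  · subst h8; simp [pvKW, List.mem_cons]
                  · simp only [beq_iff_eq, h0, h1, h2, h3, h4, h5, h6, h7, h8, if_false]
                    rw [if_neg]
                    rintro ⟨p, hp, h1, _⟩
                    simp only [pvKW, List.mem_cons, List.not_mem_nil, or_false] at hp
                    rcases hp with rfl|rfl|rfl|rfl|rfl|rfl|rfl|rfl|rfl|rfl|rfl|rfl|rfl|rfl|rfl|rfl|rfl|rfl|rfl|rfl|rfl|rfl|rfl|rfl|rfl|rfl|rfl|rfl|rfl|rfl <;> simp_all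

-- ===== VERDICT (by name: the statement is the Claim_ definition above) =====
theorem extract_features_from_text_spec : Claim_equal_extract_features_from_text := by
  intro text features _
  unfold Spec_extract_features_from_text extract_features_from_text extract_features_from_text_alt
  rw [PySem.List.foldl_append_singleton_eq_map]
  refine List.map_congr_left (fun f _ => ?_)
  rw [pvValue_eq_fired]
  by_cases h : ∃ p ∈ pvKW, p.2 = f ∧ PySem.Str.isIn p.1 (PySem.Str.lower text) = true
  · rw [if_pos h, if_pos ((fired_iff (PySem.Str.lower text) f).mpr h)]
  · rw [if_neg h]
    rw [if_neg (fun hc => h ((fired_iff (PySem.Str.lower text) f).mp hc))]
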